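-- pv_equiv track=rewrite | github.com/mattiolato98/deadlift-visual-analyzer | main.py | remove_gaps
-- ===== SOURCE A (Python) =====
-- from collections import defaultdict
--
-- def remove_gaps(rep_dict, fps):
--     """Removes gaps in frames in a rep.
--
--     A gap is defined as more than 1 * fps distance between two list elements.
--
--     Args:
--         rep_dict (dict): Dictionary containing rep index as key and list
--             of frames as value.
--         fps (int): Frames per second of the video.
--
--     Returns:
--         dict: Dictionary containing rep index as key and the longest list
--             of frames for that rep.
--
--     How it works:
--         At first, split the list containing a single rep frames in more lists without gaps, for each rep.
--         Then, it keeps the longest list for each rep.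
--
--     e.g. frames of second rep = [100, 101, 102, 133, 134, 135, 136] with fps = 30
--          cleaned rep list becomes = [133, 134, 135, 136]
--     """
--     max_gap = fps
--     cleaned_reps = defaultdict(list)
--
--     for rep, frames in rep_dict.items():
--         count = 0
--         results = defaultdict(list)
--         for idx, elem in enumerate(frames):
--             if idx != 0 and elem - frames[idx - 1] > max_gap:
--                 count += 1
--             results[count].append(elem)
--         cleaned_reps[rep].extend(max(results.values(), key=len))
--
--     return cleaned_reps
-- ===== SOURCE B (Python) =====
-- from collections import defaultdict
--
-- def remove_gaps(rep_dict, fps):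
--     """Single pass per rep: keep a current gap-free run and the best run seen,
--     updating best only on strictly greater length (ties go to the earlier run)."""
--     cleaned_reps = defaultdict(list)
--     for rep, frames in rep_dict.items():
--         best, cur, prev = [], [], None
--         for elem in frames:
--             if prev is not None and elem - prev > fps:
--                 if len(cur) > len(best):
--                     best = cur
--                 cur = []
--             cur = cur + [elem]
--             prev = elem
--         if len(cur) > len(best):
--             best = cur
--         cleaned_reps[rep] = best
--     return cleaned_reps
-- ===== Notes on version B (the rewrite author's own statement) =====
-- stated objective: simpler
-- what changed: B replaces A's count-keyed defaultdict of run groups plus a max(key=len) pass with a single streaming scan that keeps only the current run and the best run (updated on strictly greater length, so ties still go to the earliest run).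
import Mathlib
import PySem

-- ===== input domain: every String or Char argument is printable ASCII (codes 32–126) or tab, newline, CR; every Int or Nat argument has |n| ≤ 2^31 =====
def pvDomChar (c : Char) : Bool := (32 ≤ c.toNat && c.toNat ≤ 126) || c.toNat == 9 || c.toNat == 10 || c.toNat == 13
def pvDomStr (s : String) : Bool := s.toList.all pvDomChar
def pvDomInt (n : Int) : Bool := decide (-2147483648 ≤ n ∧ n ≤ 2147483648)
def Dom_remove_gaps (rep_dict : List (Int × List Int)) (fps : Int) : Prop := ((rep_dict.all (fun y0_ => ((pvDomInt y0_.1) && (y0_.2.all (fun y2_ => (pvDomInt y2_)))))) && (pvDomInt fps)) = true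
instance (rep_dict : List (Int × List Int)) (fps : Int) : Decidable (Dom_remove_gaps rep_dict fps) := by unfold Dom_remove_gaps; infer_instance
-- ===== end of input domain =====

-- B replaces A's count-keyed dict of run groups + max(key=len) by one streaming scan keeping only the current and best run (simpler decomposition, same O(n)).


-- ===== PORT A =====
-- one step of A's inner `for idx, elem in enumerate(frames)` loop; state = (count, results)
def stepA (fps : Int) (frames : List Int) (st : Int × PySem.Dict Int (List Int))
    (ie : Int × Int) : Int × PySem.Dict Int (List Int) :=
  -- `frames[idx-1]`: when idx ≠ 0 the index is always in range, so pyGet? is `some`; the `.getD 0` default is never taken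
  let count := if ie.1 ≠ 0 ∧ ie.2 - (PySem.List.pyGet? frames (ie.1 - 1)).getD 0 > fps then st.1 + 1 else st.1
  (count, st.2.insert count (st.2.getD count [] ++ [ie.2]))

def remove_gaps (rep_dict : List (Int × List Int)) (fps : Int) : List (Int × List Int) :=
  (rep_dict.foldl (fun (cleaned : PySem.Dict Int (List Int)) rf =>
      let st := (PySem.List.enumerate rf.2 0).foldl (stepA fps rf.2) (0, PySem.Dict.empty)
      match PySem.List.max? st.2.values (fun v => v.length) with
      | none => cleaned  -- Python raises ValueError on empty frames; excluded by Pre_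
      | some best => cleaned.insert rf.1 (cleaned.getD rf.1 [] ++ best))
    PySem.Dict.empty).items

-- ===== PORT B =====
-- one step of B's `for elem in frames` loop; state = (best, cur, prev)
def stepB (fps : Int) (st : List Int × List Int × Option Int) (elem : Int) :
    List Int × List Int × Option Int :=
  let bc : List Int × List Int :=
    match st.2.2 with
    | some p =>
        if elem - p > fps then
          (if st.2.1.length > st.1.length then st.2.1 else st.1, [])
        else (st.1, st.2.1)
    | none => (st.1, st.2.1)
  (bc.1, bc.2 ++ [elem], some elem)

def remove_gaps_alt (rep_dict : List (Int × List Int)) (fps : Int) : List (Int × List Int) :=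
  (rep_dict.foldl (fun (cleaned : PySem.Dict Int (List Int)) rf =>
      let st := rf.2.foldl (stepB fps) ([], [], none)
      let best := if st.2.1.length > st.1.length then st.2.1 else st.1
      cleaned.insert rf.1 best)
    PySem.Dict.empty).items

-- ===== PRECONDITION & SPEC =====
-- Pre_ excludes (a) rep_dicts with an empty frame list, on which A's max() raises ValueError, and
-- (b) rep_dicts with duplicate rep keys, which a Python dict cannot represent (the assoc list is ambiguous there).
def Pre_remove_gaps (rep_dict : List (Int × List Int)) (fps : Int) : Prop :=
  (rep_dict.map (·.1)).Nodup ∧ ∀ p ∈ rep_dict, p.2 ≠ []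
instance (rep_dict : List (Int × List Int)) (fps : Int) : Decidable (Pre_remove_gaps rep_dict fps) := by
  unfold Pre_remove_gaps; infer_instance

def pvWitness_remove_gaps : (List (Int × List Int)) × Int :=
  ([(1, [100, 101, 102, 133, 134, 135, 136]), (2, [5, 50])], 30)

def Spec_remove_gaps (rep_dict : List (Int × List Int)) (fps : Int) (out : List (Int × List Int)) : Prop := out = remove_gaps_alt rep_dict fps
instance (rep_dict : List (Int × List Int)) (fps : Int) (out : List (Int × List Int)) : Decidable (Spec_remove_gaps rep_dict fps out) := by unfold Spec_remove_gaps; infer_instance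

-- ===== CLAIM (what is proved, stated in full; the proofs are below) =====
def Claim_equal_remove_gaps : Prop := ∀ (rep_dict : List (Int × List Int)) (fps : Int), Dom_remove_gaps rep_dict fps → Pre_remove_gaps rep_dict fps → Spec_remove_gaps rep_dict fps (remove_gaps rep_dict fps)

-- ===== LEMMAS AND PROOFS =====

-- the gap-free runs of `cur ++ rest`, where `prev` is the last element of `cur`
def pvRuns (fps prev : Int) (cur : List Int) : List Int → List (List Int)
  | [] => [cur]
  | e :: rest => if e - prev > fps then cur :: pvRuns fps e [e] rest else pvRuns fps e (cur ++ [e]) rest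

-- "keep the longer run, ties to the earlier one"
def pvUpd (b v : List Int) : List Int := if v.length > b.length then v else b

theorem pvRuns_head (fps : Int) : ∀ (rest : List Int) (prev : Int) (cur : List Int), cur ≠ [] →
    ∃ v vs, pvRuns fps prev cur rest = v :: vs ∧ v ≠ [] := by
  intro rest
  induction rest with
  | nil => intro prev cur h; exact ⟨cur, [], rfl, h⟩
  | cons e rest ih =>
      intro prev cur h
      by_cases hg : e - prev > fps
      · exact ⟨cur, pvRuns fps e [e] rest, by simp [pvRuns, hg], h⟩
      · obtain ⟨v, vs, hvv, hv⟩ := ih e (cur ++ [e]) (by simp)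
        exact ⟨v, vs, by simp [pvRuns, hg, hvv], hv⟩

theorem pvMax?_cons (vs : List (List Int)) (v : List Int) :
    PySem.List.max? (v :: vs) (fun w => w.length) = some (vs.foldl pvUpd v) := by
  induction vs generalizing v with
  | nil => rfl
  | cons x xs ih =>
      show List.foldl _ (some v) (x :: xs) = _
      have : (match some v with
          | none => some x
          | some m => if m.length < x.length then some x else some m) = some (pvUpd v x) := by
        simp [pvUpd]; split_ifs with h1 <;> rfl
      simpa [List.foldl, this] using ih (pvUpd v x)

theorem pvB_loop (fps : Int) : ∀ (rest : List Int) (best cur : List Int) (prev : Int),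
    (let r := rest.foldl (stepB fps) (best, cur, some prev)
     if r.2.1.length > r.1.length then r.2.1 else r.1)
      = (pvRuns fps prev cur rest).foldl pvUpd best := by
  intro rest
  induction rest with
  | nil => intro best cur prev; simp [pvRuns, pvUpd]
  | cons e rest ih =>
      intro best cur prev
      by_cases hg : e - prev > fps
      · by_cases hl : cur.length > best.length
        · simpa [stepB, pvRuns, hg, hl, pvUpd] using ih cur [e] e
        · simpa [stepB, pvRuns, hg, hl, pvUpd] using ih best [e] e
      · simpa [stepB, pvRuns, hg] using ih best (cur ++ [e]) e

-- A's results dict after the first k+1 elements is exactly the enumerated list of runs so far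
theorem pvDict_getD_last (rs : List (List Int)) (h : rs ≠ []) :
    (PySem.Dict.mk (PySem.List.enumerate rs 0)).getD ((rs.length : Int) - 1) [] = rs.getLast h := by
  have hlen : 0 < rs.length := List.length_pos_iff.mpr h
  have hmem : (((rs.length : Int) - 1), rs.getLast h) ∈ (PySem.Dict.mk (PySem.List.enumerate rs 0)).items := by
    show _ ∈ PySem.List.enumerate rs 0
    rw [PySem.List.mem_enumerate_iff]
    refine ⟨rs.length - 1, by omega, ?_⟩
    simp only [Prod.mk.injEq]
    exact ⟨by omega, by simp [List.getLast_eq_getElem]⟩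
  have hnd : (PySem.Dict.mk (PySem.List.enumerate rs 0)).keys.Nodup := by
    have hp := PySem.List.pairwise_lt_enumerate (xs := rs) (s := 0)
    have hm : ((PySem.List.enumerate rs 0).map (·.1)).Pairwise (fun a b : Int => a < b) :=
      hp.map _ (fun a b hab => hab)
    simpa [PySem.Dict.keys, PySem.Dict.items] using hm.imp ne_of_lt
  exact PySem.Dict.getD_of_mem_items _ hmem hnd []

theorem pvDict_insert_new (rs : List (List Int)) (v : List Int) :
    (PySem.Dict.mk (PySem.List.enumerate rs 0)).insert (rs.length : Int) v
      = PySem.Dict.mk (PySem.List.enumerate (rs ++ [v]) 0) := by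
  have hc : (PySem.Dict.mk (PySem.List.enumerate rs 0)).contains (rs.length : Int) = false := by
    rw [PySem.Dict.contains_mk, List.any_eq_false]
    intro p hp
    rw [PySem.List.mem_enumerate_iff] at hp
    obtain ⟨k, hk, rfl⟩ := hp
    simp; omega
  apply PySem.Dict.ext
  rw [PySem.Dict.items_insert_of_not_contains _ _ hc]
  show PySem.List.enumerate rs 0 ++ [((rs.length : Int), v)] = _
  rw [PySem.List.enumerate_append]
  simp [PySem.List.enumerate]

theorem pvDict_insert_last (rs : List (List Int)) (h : rs ≠ []) (v : List Int) :
    (PySem.Dict.mk (PySem.List.enumerate rs 0)).insert ((rs.length : Int) - 1) v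
      = PySem.Dict.mk (PySem.List.enumerate (rs.dropLast ++ [v]) 0) := by
  have hlen : 0 < rs.length := List.length_pos_iff.mpr h
  have hc : (PySem.Dict.mk (PySem.List.enumerate rs 0)).contains ((rs.length : Int) - 1) = true := by
    rw [PySem.Dict.contains_mk, List.any_eq_true]
    refine ⟨((rs.length : Int) - 1, rs.getLast h), ?_, by simp⟩
    rw [PySem.List.mem_enumerate_iff]
    refine ⟨rs.length - 1, by omega, ?_⟩
    simp only [Prod.mk.injEq]
    exact ⟨by omega, by simp [List.getLast_eq_getElem]⟩
  apply PySem.Dict.ext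
  rw [PySem.Dict.items_insert_of_contains _ _ hc]
  show List.map _ (PySem.List.enumerate rs 0) = PySem.List.enumerate (rs.dropLast ++ [v]) 0
  apply List.ext_getElem
  · simp [PySem.List.length_enumerate]; omega
  · intro k h1 h2
    have hk : k < rs.length := by simpa [PySem.List.length_enumerate] using h1
    rw [List.getElem_map, PySem.List.getElem_enumerate, PySem.List.getElem_enumerate]
    by_cases hke : k = rs.length - 1
    · subst hke
      have : ((0 : Int) + ↑(rs.length - 1) == (rs.length : Int) - 1) = true := by simp; omega
      rw [this]
      simp only [if_true]
      have : (rs.dropLast ++ [v])[rs.length - 1] = v := by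
        rw [List.getElem_append_right (by simp)]
        simp
      rw [this]
      simp only [Prod.mk.injEq, and_true]
      omega
    · have : ((0 : Int) + ↑k == (rs.length : Int) - 1) = false := by simp; omega
      rw [this]
      simp only [Bool.false_eq_true, if_false]
      have hkl : k < rs.dropLast.length := by simp; omega
      have h3 : (rs.dropLast ++ [v])[k]'(by simp; omega) = rs[k] := by
        rw [List.getElem_append_left hkl]
        exact List.getElem_dropLast ..
      rw [h3]

theorem pvA_loop (fps : Int) (frames : List Int) : ∀ (rest : List Int) (i : Nat) (prev : Int)
    (rs : List (List Int)) (h : rs ≠ []),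
    0 < i → frames.drop i = rest → frames[i-1]? = some prev →
    (PySem.List.enumerate rest (i : Int)).foldl (stepA fps frames) (((rs.length : Int) - 1), PySem.Dict.mk (PySem.List.enumerate rs 0))
      = (((rs.dropLast ++ pvRuns fps prev (rs.getLast h) rest).length : Int) - 1,
         PySem.Dict.mk (PySem.List.enumerate (rs.dropLast ++ pvRuns fps prev (rs.getLast h) rest) 0)) := by
  intro rest
  induction rest with
  | nil =>
      intro i prev rs h hi hdrop hprev
      rw [show rs.dropLast ++ pvRuns fps prev (rs.getLast h) [] = rs by
        simp [pvRuns, List.dropLast_concat_getLast h]]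
      simp [PySem.List.enumerate]
  | cons e rest ih =>
      intro i prev rs h hi hdrop hprev
      have hie : frames[i]? = some e := by
        have := congrArg List.head? hdrop
        rw [List.head?_drop] at this; simpa using this
      have hdrop' : frames.drop (i+1) = rest := by
        rw [← List.tail_drop, hdrop]; rfl
      have hprev' : frames[(i+1)-1]? = some e := by simpa using hie
      have hget : (PySem.List.pyGet? frames ((i : Int) - 1)).getD 0 = prev := by
        have : ((i : Int) - 1) = ((i - 1 : Nat) : Int) := by omega
        rw [this, PySem.List.pyGet?_natCast, hprev]; rfl
      rw [PySem.List.enumerate_cons, List.foldl_cons]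
      by_cases hg : e - prev > fps
      · have hstep : stepA fps frames (((rs.length : Int) - 1), PySem.Dict.mk (PySem.List.enumerate rs 0)) ((i : Int), e)
            = (((rs ++ [[e]]).length : Int) - 1, PySem.Dict.mk (PySem.List.enumerate (rs ++ [[e]]) 0)) := by
          have hcond : ((i : Int) ≠ 0 ∧ e - (PySem.List.pyGet? frames ((i : Int) - 1)).getD 0 > fps) := by
            rw [hget]; exact ⟨by omega, hg⟩
          have hc : (PySem.Dict.mk (PySem.List.enumerate rs 0)).contains ((rs.length : Int) - 1 + 1) = false := by
            rw [PySem.Dict.contains_mk, List.any_eq_false]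
            intro p hp
            rw [PySem.List.mem_enumerate_iff] at hp
            obtain ⟨k, hk, rfl⟩ := hp
            simp; omega
          simp only [stepA, if_pos hcond]
          rw [PySem.Dict.getD_of_not_contains _ _ hc]
          rw [show ((rs.length : Int) - 1 + 1) = (rs.length : Int) by omega]
          rw [pvDict_insert_new]
          simp
        rw [hstep]
        have h' : rs ++ [[e]] ≠ [] := by simp
        have := ih (i+1) e (rs ++ [[e]]) h' (by omega) hdrop' hprev'
        rw [show ((i : Int) + 1) = (((i+1 : Nat)) : Int) by omega]
        rw [this]
        have hdl : (rs ++ [[e]]).dropLast = rs := by simp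
        have hgl : (rs ++ [[e]]).getLast h' = [e] := by simp
        rw [hdl, hgl]
        rw [show pvRuns fps prev (rs.getLast h) (e :: rest) = rs.getLast h :: pvRuns fps e [e] rest by
          simp [pvRuns, hg]]
        rw [show rs.dropLast ++ rs.getLast h :: pvRuns fps e [e] rest = rs ++ pvRuns fps e [e] rest from by
          calc rs.dropLast ++ rs.getLast h :: pvRuns fps e [e] rest
              = (rs.dropLast ++ [rs.getLast h]) ++ pvRuns fps e [e] rest := by simp
            _ = rs ++ pvRuns fps e [e] rest := by rw [List.dropLast_concat_getLast h]]
      · have hstep : stepA fps frames (((rs.length : Int) - 1), PySem.Dict.mk (PySem.List.enumerate rs 0)) ((i : Int), e)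
            = ((((rs.dropLast ++ [rs.getLast h ++ [e]]).length : Int) - 1),
               PySem.Dict.mk (PySem.List.enumerate (rs.dropLast ++ [rs.getLast h ++ [e]]) 0)) := by
          have hcond : ¬ ((i : Int) ≠ 0 ∧ e - (PySem.List.pyGet? frames ((i : Int) - 1)).getD 0 > fps) := by
            rw [hget]; intro ⟨_, hx⟩; exact hg hx
          simp only [stepA, if_neg hcond]
          rw [pvDict_getD_last rs h, pvDict_insert_last rs h]
          have hlen : 0 < rs.length := List.length_pos_iff.mpr h
          simp; omega
        rw [hstep]
        have h' : rs.dropLast ++ [rs.getLast h ++ [e]] ≠ [] := by simp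
        have := ih (i+1) e (rs.dropLast ++ [rs.getLast h ++ [e]]) h' (by omega) hdrop' hprev'
        rw [show ((i : Int) + 1) = (((i+1 : Nat)) : Int) by omega]
        rw [this]
        have hdl : (rs.dropLast ++ [rs.getLast h ++ [e]]).dropLast = rs.dropLast := by simp
        have hgl : (rs.dropLast ++ [rs.getLast h ++ [e]]).getLast h' = rs.getLast h ++ [e] := by
          simp
        rw [hdl, hgl]
        rw [show pvRuns fps prev (rs.getLast h) (e :: rest) = pvRuns fps e (rs.getLast h ++ [e]) rest by
          simp [pvRuns, hg]]

theorem pvInner_values (fps : Int) (f0 : Int) (fs : List Int) :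
    ((PySem.List.enumerate (f0 :: fs) 0).foldl (stepA fps (f0 :: fs)) (0, PySem.Dict.empty)).2.values
      = pvRuns fps f0 [f0] fs := by
  rw [PySem.List.enumerate_cons, List.foldl_cons]
  have hstep : stepA fps (f0 :: fs) (0, PySem.Dict.empty) ((0 : Int), f0)
      = ((([[f0]] : List (List Int)).length : Int) - 1, PySem.Dict.mk (PySem.List.enumerate [[f0]] 0)) := by
    have hcond : ¬ ((0 : Int) ≠ 0 ∧ f0 - (PySem.List.pyGet? (f0 :: fs) ((0 : Int) - 1)).getD 0 > fps) := by
      intro ⟨hx, _⟩; exact hx rfl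
    simp only [stepA, if_neg hcond]
    apply Prod.ext
    · simp
    · apply PySem.Dict.ext
      rw [PySem.Dict.items_insert_of_not_contains _ _ (by simp [PySem.Dict.contains_empty])]
      show [] ++ [((0:Int), PySem.Dict.getD { items := [] } 0 [] ++ [f0])] = PySem.List.enumerate [[f0]] 0
      rfl
  rw [hstep, show ((0:Int) + 1) = ((1:Nat):Int) by norm_num, pvA_loop fps (f0 :: fs) fs 1 f0 [[f0]] (by simp) (by omega) (by simp) (by simp)]
  show (PySem.List.enumerate (([[f0]] : List (List Int)).dropLast ++ pvRuns fps f0 (([[f0]] : List (List Int)).getLast (by simp)) fs) 0).map (·.2) = _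
  rw [PySem.List.map_snd_enumerate]
  simp

theorem pvPerRep (fps : Int) (frames : List Int) (h : frames ≠ []) :
    PySem.List.max? ((PySem.List.enumerate frames 0).foldl (stepA fps frames) (0, PySem.Dict.empty)).2.values (fun v => v.length)
      = some (let st := frames.foldl (stepB fps) ([], [], none)
              if st.2.1.length > st.1.length then st.2.1 else st.1) := by
  obtain ⟨f0, fs, rfl⟩ : ∃ f0 fs, frames = f0 :: fs := by
    cases frames with
    | nil => exact absurd rfl h
    | cons a l => exact ⟨a, l, rfl⟩
  rw [pvInner_values]
  obtain ⟨v, vs, hrv, hv⟩ := pvRuns_head fps fs f0 [f0] (by simp)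
  rw [hrv, pvMax?_cons]
  congr 1
  have hfirst : (f0 :: fs).foldl (stepB fps) ([], [], none) = fs.foldl (stepB fps) ([], [f0], some f0) := by
    rfl
  show _ = (let r := fs.foldl (stepB fps) ([], [f0], some f0);
      if r.2.1.length > r.1.length then r.2.1 else r.1)
  rw [pvB_loop fps fs [] [f0] f0, hrv, List.foldl_cons]
  rw [show pvUpd [] v = v from by
    simp only [pvUpd]
    rw [if_pos]
    simpa using List.length_pos_iff.mpr hv]

theorem pvOuter (fps : Int) : ∀ (rd : List (Int × List Int)) (d : PySem.Dict Int (List Int)),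
    (∀ p ∈ rd, p.2 ≠ []) → (∀ p ∈ rd, d.contains p.1 = false) → (rd.map (·.1)).Nodup →
    rd.foldl (fun (cleaned : PySem.Dict Int (List Int)) rf =>
        let st := (PySem.List.enumerate rf.2 0).foldl (stepA fps rf.2) (0, PySem.Dict.empty)
        match PySem.List.max? st.2.values (fun v => v.length) with
        | none => cleaned
        | some best => cleaned.insert rf.1 (cleaned.getD rf.1 [] ++ best)) d
      = rd.foldl (fun (cleaned : PySem.Dict Int (List Int)) rf =>
        let st := rf.2.foldl (stepB fps) ([], [], none)
        let best := if st.2.1.length > st.1.length then st.2.1 else st.1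
        cleaned.insert rf.1 best) d := by
  intro rd
  induction rd with
  | nil => intro d _ _ _; rfl
  | cons p rest ih =>
      intro d hne hct hnd
      have hpr := pvPerRep fps p.2 (hne p (by simp))
      simp only [List.foldl_cons]
      simp only [hpr]
      rw [PySem.Dict.getD_of_not_contains _ _ (hct p (by simp))]
      rw [List.nil_append]
      apply ih
      · intro q hq; exact hne q (by simp [hq])
      · intro q hq
        rw [PySem.Dict.contains_insert]
        have h1 : (q.1 == p.1) = false := by
          have : p.1 ∉ rest.map (·.1) := by
            have := hnd; simp only [List.map_cons, List.nodup_cons] at this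
            exact this.1
          simp only [beq_eq_false_iff_ne, ne_eq]
          intro hqp; exact this (hqp ▸ List.mem_map_of_mem hq)
        rw [h1, hct q (by simp [hq])]
        rfl
      · have := hnd; simp only [List.map_cons, List.nodup_cons] at this
        exact this.2

-- ===== VERDICT (by name: the statement is the Claim_ definition above) =====
theorem remove_gaps_spec : Claim_equal_remove_gaps := by
  intro rd fps _ hpre
  unfold Spec_remove_gaps remove_gaps remove_gaps_alt
  rw [pvOuter fps rd PySem.Dict.empty hpre.2 (by intro p _; simp) hpre.1]
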